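-- pv_equiv track=rewrite | github.com/unimorph/ud-validation | evaluate.py | constructFeatureSets
-- ===== SOURCE A (Python) =====
-- def plusFeatures(prefix, plus_sets):
--     ans = []
--     if len(plus_sets) == 0:
--         ans.append(prefix)
--         return ans
--     plus_set = plus_sets[0]
--     leftover = plus_sets[1:]
--     for feature in plus_set:
--         ans.extend(plusFeatures(prefix+';'+feature, leftover))
--     return ans
--
-- def constructFeatureSets(features):
--     single_features = []
--     plus_sets = []
--     feas = features.split(';')
--     ans = []
--     for feature in feas:
--         if ('+' in feature) is False:
--             single_features.append(feature)
--         else: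
--             plus_sets.append(feature.split('+'))
--
--     feature_form = ';'.join(sorted(single_features))
--
--     if len(plus_sets) > 0:
--         all_variations = plusFeatures('',plus_sets)
--         for variaty in all_variations:
--             variaty = feature_form + variaty
--             ans.append(';'.join(sorted(variaty.split(';'))))
--     else:
--         ans.append(feature_form)
--     return ans
-- ===== SOURCE B (Python) =====
-- from itertools import product
--
-- def constructFeatureSets(features):
--     feas = features.split(';')
--     feature_form = ';'.join(sorted(f for f in feas if '+' not in f))
--     plus_sets = [f.split('+') for f in feas if '+' in f]
--     if not plus_sets:
--         return [feature_form]
--     out = []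
--     for combo in product(*plus_sets):
--         variaty = feature_form + ';' + ';'.join(combo)
--         out.append(';'.join(sorted(variaty.split(';'))))
--     return out
-- ===== Notes on version B (the rewrite author's own statement) =====
-- stated objective: idiomatic
-- what changed: The recursive prefix-string-building plusFeatures helper is replaced by a flat Cartesian product (itertools.product) over the plus-groups, with classification done by two filters instead of a pair-accumulator loop and each combination joined directly.
import Mathlib
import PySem

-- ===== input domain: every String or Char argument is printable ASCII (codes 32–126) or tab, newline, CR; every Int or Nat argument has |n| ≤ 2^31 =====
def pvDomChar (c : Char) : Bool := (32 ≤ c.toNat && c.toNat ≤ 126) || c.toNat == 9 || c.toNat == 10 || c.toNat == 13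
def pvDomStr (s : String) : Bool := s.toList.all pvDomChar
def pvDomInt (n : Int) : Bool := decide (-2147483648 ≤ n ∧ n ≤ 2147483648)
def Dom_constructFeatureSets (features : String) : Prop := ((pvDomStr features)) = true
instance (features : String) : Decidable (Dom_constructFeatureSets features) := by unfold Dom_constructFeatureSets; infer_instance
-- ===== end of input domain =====

-- B replaces the recursive prefix-building plusFeatures helper with a flat Cartesian product
-- (itertools.product) mapped over in one pass; objective: more idiomatic. Same return value.

-- shared shim for Python's s.split(sep) with a nonempty literal separator (split? is some there)
def pySplit (s sep : String) : List String := (PySem.Str.split? s sep).getD []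

-- ===== PORT A =====
def plusFeaturesA (pfx : String) (plus_sets : List (List String)) : List String :=
  match plus_sets with
  | [] => [pfx]
  | plus_set :: leftover =>
      plus_set.foldl (fun ans feature => ans ++ plusFeaturesA (pfx ++ ";" ++ feature) leftover) []

def constructFeatureSets (features : String) : List String :=
  let feas := pySplit features ";"
  let sp := feas.foldl (fun (acc : List String × List (List String)) feature =>
      if PySem.Str.isIn "+" feature = false then (acc.1 ++ [feature], acc.2)
      else (acc.1, acc.2 ++ [pySplit feature "+"])) ([], [])
  let feature_form := PySem.Str.join ";" (PySem.List.sorted sp.1 (fun x => x.toList) false)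
  if sp.2.length > 0 then
    (plusFeaturesA "" sp.2).foldl (fun ans variaty =>
      ans ++ [PySem.Str.join ";" (PySem.List.sorted (pySplit (feature_form ++ variaty) ";") (fun x => x.toList) false)]) []
  else [feature_form]

-- ===== PORT B =====
def prodAllB (gs : List (List String)) : List (List String) :=
  match gs with
  | [] => [[]]
  | g :: rest => g.flatMap (fun f => (prodAllB rest).map (f :: ·))

def constructFeatureSets_alt (features : String) : List String :=
  let feas := pySplit features ";"
  let feature_form := PySem.Str.join ";"
      (PySem.List.sorted (feas.filter (fun f => !PySem.Str.isIn "+" f)) (fun x => x.toList) false)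
  let plus_sets := (feas.filter (fun f => PySem.Str.isIn "+" f)).map (fun f => pySplit f "+")
  if plus_sets.isEmpty then [feature_form]
  else
    (prodAllB plus_sets).map (fun combo =>
      PySem.Str.join ";" (PySem.List.sorted
        (pySplit (feature_form ++ ";" ++ PySem.Str.join ";" combo) ";") (fun x => x.toList) false))

-- ===== PRECONDITION & SPEC =====
def Spec_constructFeatureSets (features : String) (out : List String) : Prop := out = constructFeatureSets_alt features
instance (features : String) (out : List String) : Decidable (Spec_constructFeatureSets features out) := by unfold Spec_constructFeatureSets; infer_instance

-- ===== CLAIM (what is proved, stated in full; the proofs are below) =====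
def Claim_equal_constructFeatureSets : Prop := ∀ (features : String), Dom_constructFeatureSets features → Spec_constructFeatureSets features (constructFeatureSets features)

-- ===== LEMMAS AND PROOFS =====

-- A's classifying loop over a pair accumulator is the two filters of B
theorem splitLoopA (l : List String) (s : List String) (q : List (List String)) :
    l.foldl (fun (acc : List String × List (List String)) feature =>
        if PySem.Str.isIn "+" feature = false then (acc.1 ++ [feature], acc.2)
        else (acc.1, acc.2 ++ [pySplit feature "+"])) (s, q)
      = (s ++ l.filter (fun f => !PySem.Str.isIn "+" f),
         q ++ (l.filter (fun f => PySem.Str.isIn "+" f)).map (fun f => pySplit f "+")) := by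
  induction l generalizing s q with
  | nil => simp
  | cons x l ih =>
      rw [List.foldl_cons]
      cases hb : PySem.Chars.isIn ['+'] x.toList with
      | false => rw [if_pos (by simp [hb]), ih]; simp [hb]
      | true => rw [if_neg (by simp [hb]), ih]; simp [hb]

-- A's recursion enumerates exactly the Cartesian product, last group fastest,
-- each combo rendered as the prefix followed by ';'-prefixed elements.
theorem plusFeaturesA_eq_prodAllB (gs : List (List String)) (pfx : String) :
    plusFeaturesA pfx gs
      = (prodAllB gs).map (fun combo => combo.foldl (fun p f => p ++ ";" ++ f) pfx) := by
  induction gs generalizing pfx with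
  | nil => simp [plusFeaturesA, prodAllB]
  | cons g rest ih =>
      simp only [plusFeaturesA, prodAllB, PySem.List.foldl_append_eq_flatMap, List.nil_append,
        List.map_flatMap, List.map_map]
      refine List.flatMap_congr ?_
      intro f _
      rw [ih]
      rfl

theorem foldl_semi_toList (c : List String) (p : String) :
    (c.foldl (fun p f => p ++ ";" ++ f) p).toList
      = p.toList ++ (c.map (fun f => ';' :: f.toList)).flatten := by
  induction c generalizing p with
  | nil => simp
  | cons f r ih =>
      simp [List.foldl_cons, ih, String.toList_append]

theorem semi_flatten_join (c : List String) (hc : c ≠ []) :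
    (c.map (fun f => ';' :: f.toList)).flatten
      = ';' :: PySem.Chars.join [';'] (c.map String.toList) := by
  induction c with
  | nil => exact absurd rfl hc
  | cons f r ih =>
      cases r with
      | nil => simp [PySem.Chars.join_singleton]
      | cons g t =>
          have h2 := ih (by simp)
          simp only [List.map_cons, List.flatten_cons] at h2 ⊢
          rw [h2, PySem.Chars.join_cons_cons]
          simp

theorem length_mem_prodAllB (gs : List (List String)) (c : List String)
    (h : c ∈ prodAllB gs) : c.length = gs.length := by
  induction gs generalizing c with
  | nil => simp [prodAllB] at h; simp [h]
  | cons g rest ih =>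
      simp only [prodAllB, List.mem_flatMap, List.mem_map] at h
      obtain ⟨f, _, c', hc', rfl⟩ := h
      simp [ih c' hc']

-- ===== VERDICT (by name: the statement is the Claim_ definition above) =====
theorem constructFeatureSets_spec : Claim_equal_constructFeatureSets := by
  intro features _
  show constructFeatureSets features = constructFeatureSets_alt features
  unfold constructFeatureSets constructFeatureSets_alt
  dsimp only
  rw [splitLoopA]
  simp only [List.nil_append]
  set feas := pySplit features ";" with hfeas
  set p2 := (feas.filter (fun f => PySem.Str.isIn "+" f)).map (fun f => pySplit f "+") with hp2
  set ff := PySem.Str.join ";"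
      (PySem.List.sorted (feas.filter (fun f => !PySem.Str.isIn "+" f)) (fun x => x.toList) false) with hff
  by_cases hne : p2 = []
  · simp [hne]
  · have hl : p2.length > 0 := List.length_pos_iff.mpr hne
    rw [if_pos hl, if_neg (by simp [List.isEmpty_iff, hne])]
    rw [plusFeaturesA_eq_prodAllB, PySem.List.foldl_append_singleton_eq_map, List.map_map]
    refine List.map_congr_left ?_
    intro c hc
    have hclen : c.length = p2.length := length_mem_prodAllB _ _ hc
    have hcne : c ≠ [] := by
      intro h; rw [h] at hclen; simp at hclen; omega
    simp only [Function.comp]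
    have harg : ff ++ (c.foldl (fun p f => p ++ ";" ++ f) "")
        = ff ++ ";" ++ PySem.Str.join ";" c := by
      apply String.toList_inj.mp
      rw [String.toList_append, String.toList_append, String.toList_append,
        foldl_semi_toList, semi_flatten_join c hcne, PySem.Str.toList_join]
      simp
    rw [harg]
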